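-- pv_equiv track=rewrite | github.com/Beykus-Y/Selara_Bot | src/selara/presentation/handlers/relationships.py | _affection_stage_label
-- ===== SOURCE A (Python) =====
-- _AFFECTION_STAGES: list[tuple[int, str]] = [
--     (0,    "Знакомые 🤝"),
--     (30,   "Симпатия 🌱"),
--     (80,   "Флирт 😊"),
--     (150,  "Влюблённость 💕"),
--     (300,  "Близость 🌸"),
--     (500,  "Страсть 🔥"),
--     (800,  "Преданность 💫"),
--     (1200, "Глубокая связь 💞"),
--     (2000, "Родственные души ✨"),
--     (3000, "Вечная любовь 🌟"),
-- ]
--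
-- def _affection_stage_label(points: int) -> str:
--     label = _AFFECTION_STAGES[0][1]
--     for threshold, name in _AFFECTION_STAGES:
--         if points >= threshold:
--             label = name
--         else:
--             break
--     return label
-- ===== SOURCE B (Python) =====
-- _AFFECTION_STAGES: list[tuple[int, str]] = [
--     (0,    "Знакомые 🤝"),
--     (30,   "Симпатия 🌱"),
--     (80,   "Флирт 😊"),
--     (150,  "Влюблённость 💕"),
--     (300,  "Близость 🌸"),
--     (500,  "Страсть 🔥"),
--     (800,  "Преданность 💫"),
--     (1200, "Глубокая связь 💞"),
--     (2000, "Родственные души ✨"),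
--     (3000, "Вечная любовь 🌟"),
-- ]
--
-- def _affection_stage_label(points: int) -> str:
--     # binary search (bisect_right) over the sorted thresholds
--     lo, hi = 0, len(_AFFECTION_STAGES)
--     while lo < hi:
--         mid = (lo + hi) // 2
--         if points < _AFFECTION_STAGES[mid][0]:
--             hi = mid
--         else:
--             lo = mid + 1
--     return _AFFECTION_STAGES[max(lo - 1, 0)][1]
-- ===== Notes on version B (the rewrite author's own statement) =====
-- stated objective: alternative
-- what changed: Replaces the linear scan-with-break over the stage table by a hand-written bisect_right binary search over the sorted thresholds, returning the label at max(idx-1, 0).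
import Mathlib
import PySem

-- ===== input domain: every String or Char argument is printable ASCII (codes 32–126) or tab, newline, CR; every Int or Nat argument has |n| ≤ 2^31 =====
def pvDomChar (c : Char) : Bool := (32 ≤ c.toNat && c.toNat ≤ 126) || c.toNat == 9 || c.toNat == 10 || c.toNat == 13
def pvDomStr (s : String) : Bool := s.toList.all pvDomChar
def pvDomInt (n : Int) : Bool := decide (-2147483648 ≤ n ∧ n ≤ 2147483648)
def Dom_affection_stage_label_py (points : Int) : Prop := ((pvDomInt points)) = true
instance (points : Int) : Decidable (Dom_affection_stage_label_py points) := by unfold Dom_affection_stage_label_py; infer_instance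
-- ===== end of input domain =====

-- B replaces A's linear scan-with-break over the stage table by a hand-written bisect_right binary search over the sorted thresholds (alternative decomposition, same results).

-- ===== PORT A =====
def pvStages : List (Int × String) := [
  (0,    "Знакомые 🤝"),
  (30,   "Симпатия 🌱"),
  (80,   "Флирт 😊"),
  (150,  "Влюблённость 💕"),
  (300,  "Близость 🌸"),
  (500,  "Страсть 🔥"),
  (800,  "Преданность 💫"),
  (1200, "Глубокая связь 💞"),
  (2000, "Родственные души ✨"),
  (3000, "Вечная любовь 🌟")]

-- A's for-loop with break: recurse over the table carrying `label`
def pvALoop (points : Int) (label : String) : List (Int × String) → String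
  | [] => label
  | (threshold, name) :: rest =>
      if points ≥ threshold then pvALoop points name rest else label

def affection_stage_label_py (points : Int) : String :=
  pvALoop points (((PySem.List.pyGet? pvStages 0).getD (0, "")).2) pvStages

-- ===== PORT B =====
-- B's while-loop (hand-written bisect_right); lo, hi : Nat as in the Python; fuel hi-lo bounds the iteration count (the interval shrinks by at least 1 per step)
def pvBGo (points : Int) : Nat → Nat → Nat → Nat
  | 0, lo, _ => lo
  | fuel + 1, lo, hi =>
    if lo < hi then
      let mid := (lo + hi) / 2
      if points < ((PySem.List.pyGet? pvStages (mid : Int)).getD (0, "")).1 then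
        pvBGo points fuel lo mid
      else
        pvBGo points fuel (mid + 1) hi
    else lo

def pvBLoop (points : Int) (lo hi : Nat) : Nat := pvBGo points (hi - lo) lo hi

def affection_stage_label_py_alt (points : Int) : String :=
  let lo := pvBLoop points 0 pvStages.length
  ((PySem.List.pyGet? pvStages (max ((lo : Int) - 1) 0)).getD (0, "")).2

-- ===== PRECONDITION & SPEC =====
def Spec_affection_stage_label_py (points : Int) (out : String) : Prop := out = affection_stage_label_py_alt points
instance (points : Int) (out : String) : Decidable (Spec_affection_stage_label_py points out) := by unfold Spec_affection_stage_label_py; infer_instance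

-- ===== CLAIM (what is proved, stated in full; the proofs are below) =====
def Claim_equal_affection_stage_label_py : Prop := ∀ (points : Int), Dom_affection_stage_label_py points → Spec_affection_stage_label_py points (affection_stage_label_py points)

-- ===== LEMMAS AND PROOFS =====

-- one-step unfolding of the search at each reachable (lo, hi) node (definitional, structural on the fuel)
lemma pvB_0_0 (p : Int) : pvBGo p 6 0 0 = 0 := rfl
lemma pvB_0_1 (p : Int) : pvBGo p 7 0 1 = if p < 0 then pvBGo p 6 0 0 else pvBGo p 6 1 1 := rfl
lemma pvB_0_2 (p : Int) : pvBGo p 8 0 2 = if p < 30 then pvBGo p 7 0 1 else pvBGo p 7 2 2 := rfl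
lemma pvB_0_5 (p : Int) : pvBGo p 9 0 5 = if p < 80 then pvBGo p 8 0 2 else pvBGo p 8 3 5 := rfl
lemma pvB_0_10 (p : Int) : pvBGo p 10 0 10 = if p < 500 then pvBGo p 9 0 5 else pvBGo p 9 6 10 := rfl
lemma pvB_1_1 (p : Int) : pvBGo p 6 1 1 = 1 := rfl
lemma pvB_2_2 (p : Int) : pvBGo p 7 2 2 = 2 := rfl
lemma pvB_3_3 (p : Int) : pvBGo p 6 3 3 = 3 := rfl
lemma pvB_3_4 (p : Int) : pvBGo p 7 3 4 = if p < 150 then pvBGo p 6 3 3 else pvBGo p 6 4 4 := rfl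
lemma pvB_3_5 (p : Int) : pvBGo p 8 3 5 = if p < 300 then pvBGo p 7 3 4 else pvBGo p 7 5 5 := rfl
lemma pvB_4_4 (p : Int) : pvBGo p 6 4 4 = 4 := rfl
lemma pvB_5_5 (p : Int) : pvBGo p 7 5 5 = 5 := rfl
lemma pvB_6_6 (p : Int) : pvBGo p 6 6 6 = 6 := rfl
lemma pvB_6_7 (p : Int) : pvBGo p 7 6 7 = if p < 800 then pvBGo p 6 6 6 else pvBGo p 6 7 7 := rfl
lemma pvB_6_8 (p : Int) : pvBGo p 8 6 8 = if p < 1200 then pvBGo p 7 6 7 else pvBGo p 7 8 8 := rfl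
lemma pvB_6_10 (p : Int) : pvBGo p 9 6 10 = if p < 2000 then pvBGo p 8 6 8 else pvBGo p 8 9 10 := rfl
lemma pvB_7_7 (p : Int) : pvBGo p 6 7 7 = 7 := rfl
lemma pvB_8_8 (p : Int) : pvBGo p 7 8 8 = 8 := rfl
lemma pvB_9_9 (p : Int) : pvBGo p 7 9 9 = 9 := rfl
lemma pvB_9_10 (p : Int) : pvBGo p 8 9 10 = if p < 3000 then pvBGo p 7 9 9 else pvBGo p 7 10 10 := rfl
lemma pvB_10_10 (p : Int) : pvBGo p 7 10 10 = 10 := rfl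

lemma pvAll (points : Int) : affection_stage_label_py points = affection_stage_label_py_alt points := by
  unfold affection_stage_label_py affection_stage_label_py_alt pvBLoop
  rw [show pvStages.length = 10 from rfl]
  simp only [pvStages, pvALoop]
  by_cases h0 : points < 0
  · -- points < 0
    rw [pvB_0_10, if_pos (show points < 500 by omega), pvB_0_5, if_pos (show points < 80 by omega), pvB_0_2, if_pos (show points < 30 by omega), pvB_0_1, if_pos (show points < 0 by omega), pvB_0_0]
    rw [if_neg (show ¬ points ≥ (0:Int) by omega)]
    rfl
  by_cases h1 : points < 30
  · -- 0 ≤ points < 30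
    rw [pvB_0_10, if_pos (show points < 500 by omega), pvB_0_5, if_pos (show points < 80 by omega), pvB_0_2, if_pos (show points < 30 by omega), pvB_0_1, if_neg (show ¬ points < 0 by omega), pvB_1_1]
    rw [if_pos (show points ≥ (0:Int) by omega), if_neg (show ¬ points ≥ (30:Int) by omega)]
    rfl
  by_cases h2 : points < 80
  · -- 30 ≤ points < 80
    rw [pvB_0_10, if_pos (show points < 500 by omega), pvB_0_5, if_pos (show points < 80 by omega), pvB_0_2, if_neg (show ¬ points < 30 by omega), pvB_2_2]
    rw [if_pos (show points ≥ (0:Int) by omega), if_pos (show points ≥ (30:Int) by omega), if_neg (show ¬ points ≥ (80:Int) by omega)]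
    rfl
  by_cases h3 : points < 150
  · -- 80 ≤ points < 150
    rw [pvB_0_10, if_pos (show points < 500 by omega), pvB_0_5, if_neg (show ¬ points < 80 by omega), pvB_3_5, if_pos (show points < 300 by omega), pvB_3_4, if_pos (show points < 150 by omega), pvB_3_3]
    rw [if_pos (show points ≥ (0:Int) by omega), if_pos (show points ≥ (30:Int) by omega), if_pos (show points ≥ (80:Int) by omega), if_neg (show ¬ points ≥ (150:Int) by omega)]
    rfl
  by_cases h4 : points < 300
  · -- 150 ≤ points < 300
    rw [pvB_0_10, if_pos (show points < 500 by omega), pvB_0_5, if_neg (show ¬ points < 80 by omega), pvB_3_5, if_pos (show points < 300 by omega), pvB_3_4, if_neg (show ¬ points < 150 by omega), pvB_4_4]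
    rw [if_pos (show points ≥ (0:Int) by omega), if_pos (show points ≥ (30:Int) by omega), if_pos (show points ≥ (80:Int) by omega), if_pos (show points ≥ (150:Int) by omega), if_neg (show ¬ points ≥ (300:Int) by omega)]
    rfl
  by_cases h5 : points < 500
  · -- 300 ≤ points < 500
    rw [pvB_0_10, if_pos (show points < 500 by omega), pvB_0_5, if_neg (show ¬ points < 80 by omega), pvB_3_5, if_neg (show ¬ points < 300 by omega), pvB_5_5]
    rw [if_pos (show points ≥ (0:Int) by omega), if_pos (show points ≥ (30:Int) by omega), if_pos (show points ≥ (80:Int) by omega), if_pos (show points ≥ (150:Int) by omega), if_pos (show points ≥ (300:Int) by omega), if_neg (show ¬ points ≥ (500:Int) by omega)]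
    rfl
  by_cases h6 : points < 800
  · -- 500 ≤ points < 800
    rw [pvB_0_10, if_neg (show ¬ points < 500 by omega), pvB_6_10, if_pos (show points < 2000 by omega), pvB_6_8, if_pos (show points < 1200 by omega), pvB_6_7, if_pos (show points < 800 by omega), pvB_6_6]
    rw [if_pos (show points ≥ (0:Int) by omega), if_pos (show points ≥ (30:Int) by omega), if_pos (show points ≥ (80:Int) by omega), if_pos (show points ≥ (150:Int) by omega), if_pos (show points ≥ (300:Int) by omega), if_pos (show points ≥ (500:Int) by omega), if_neg (show ¬ points ≥ (800:Int) by omega)]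
    rfl
  by_cases h7 : points < 1200
  · -- 800 ≤ points < 1200
    rw [pvB_0_10, if_neg (show ¬ points < 500 by omega), pvB_6_10, if_pos (show points < 2000 by omega), pvB_6_8, if_pos (show points < 1200 by omega), pvB_6_7, if_neg (show ¬ points < 800 by omega), pvB_7_7]
    rw [if_pos (show points ≥ (0:Int) by omega), if_pos (show points ≥ (30:Int) by omega), if_pos (show points ≥ (80:Int) by omega), if_pos (show points ≥ (150:Int) by omega), if_pos (show points ≥ (300:Int) by omega), if_pos (show points ≥ (500:Int) by omega), if_pos (show points ≥ (800:Int) by omega), if_neg (show ¬ points ≥ (1200:Int) by omega)]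
    rfl
  by_cases h8 : points < 2000
  · -- 1200 ≤ points < 2000
    rw [pvB_0_10, if_neg (show ¬ points < 500 by omega), pvB_6_10, if_pos (show points < 2000 by omega), pvB_6_8, if_neg (show ¬ points < 1200 by omega), pvB_8_8]
    rw [if_pos (show points ≥ (0:Int) by omega), if_pos (show points ≥ (30:Int) by omega), if_pos (show points ≥ (80:Int) by omega), if_pos (show points ≥ (150:Int) by omega), if_pos (show points ≥ (300:Int) by omega), if_pos (show points ≥ (500:Int) by omega), if_pos (show points ≥ (800:Int) by omega), if_pos (show points ≥ (1200:Int) by omega), if_neg (show ¬ points ≥ (2000:Int) by omega)]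
    rfl
  by_cases h9 : points < 3000
  · -- 2000 ≤ points < 3000
    rw [pvB_0_10, if_neg (show ¬ points < 500 by omega), pvB_6_10, if_neg (show ¬ points < 2000 by omega), pvB_9_10, if_pos (show points < 3000 by omega), pvB_9_9]
    rw [if_pos (show points ≥ (0:Int) by omega), if_pos (show points ≥ (30:Int) by omega), if_pos (show points ≥ (80:Int) by omega), if_pos (show points ≥ (150:Int) by omega), if_pos (show points ≥ (300:Int) by omega), if_pos (show points ≥ (500:Int) by omega), if_pos (show points ≥ (800:Int) by omega), if_pos (show points ≥ (1200:Int) by omega), if_pos (show points ≥ (2000:Int) by omega), if_neg (show ¬ points ≥ (3000:Int) by omega)]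
    rfl
  -- 3000 ≤ points
  rw [pvB_0_10, if_neg (show ¬ points < 500 by omega), pvB_6_10, if_neg (show ¬ points < 2000 by omega), pvB_9_10, if_neg (show ¬ points < 3000 by omega), pvB_10_10]
  rw [if_pos (show points ≥ (0:Int) by omega), if_pos (show points ≥ (30:Int) by omega), if_pos (show points ≥ (80:Int) by omega), if_pos (show points ≥ (150:Int) by omega), if_pos (show points ≥ (300:Int) by omega), if_pos (show points ≥ (500:Int) by omega), if_pos (show points ≥ (800:Int) by omega), if_pos (show points ≥ (1200:Int) by omega), if_pos (show points ≥ (2000:Int) by omega), if_pos (show points ≥ (3000:Int) by omega)]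
  rfl

-- ===== VERDICT (by name: the statement is the Claim_ definition above) =====
theorem affection_stage_label_py_spec : Claim_equal_affection_stage_label_py := by
  intro points _
  unfold Spec_affection_stage_label_py
  exact pvAll points
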